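-- pv_equiv track=rewrite | github.com/Sehati-by-DBS-Coding-Camp/Sehati-API-FastAPI | app/dass21.py | hitung_skala_dass21
-- ===== SOURCE A (Python) =====
-- def hitung_skala_dass21(depresi, kecemasan, stress):
--     dass21_scale = {
--     "Depresi": [(0, 9, "Normal"), (10, 13, "Ringan"), (14, 20, "Sedang"), (21, 27, "Berat"), (28, 100, "Sangat berat")],
--     "Kecemasan": [(0, 7, "Normal"), (8, 9, "Ringan"), (10, 14, "Sedang"), (15, 19, "Berat"), (20, 100, "Sangat berat")],
--     "Stres": [(0, 14, "Normal"), (15, 18, "Ringan"), (19, 25, "Sedang"), (26, 33, "Berat"), (34, 100, "Sangat berat")]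
--     }
--
--     hasil_depresi = ""
--     for min_val, max_val, kategori in dass21_scale["Depresi"]:
--         if min_val <= depresi <= max_val:
--             hasil_depresi = kategori
--             break
--
--     hasil_kecemasan = ""
--     for min_val, max_val, kategori in dass21_scale["Kecemasan"]:
--         if min_val <= kecemasan <= max_val:
--             hasil_kecemasan = kategori
--             break
--
--     hasil_stres = ""
--     for min_val, max_val, kategori in dass21_scale["Stres"]:
--         if min_val <= stress <= max_val:
--             hasil_stres = kategori
--             break
--
--     return {
--         "Depresi": hasil_depresi,
--         "Kecemasan": hasil_kecemasan,
--         "Stres": hasil_stres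
--     }
-- ===== SOURCE B (Python) =====
-- import bisect
--
-- _LABELS = ["Normal", "Ringan", "Sedang", "Berat", "Sangat berat"]
-- _BOUNDS = {"Depresi": [9, 13, 20, 27, 100],
--            "Kecemasan": [7, 9, 14, 19, 100],
--            "Stres": [14, 18, 25, 33, 100]}
--
-- def _kategori(score, bounds):
--     if score < 0 or score > bounds[-1]:
--         return ""
--     return _LABELS[bisect.bisect_left(bounds, score)]
--
-- def hitung_skala_dass21(depresi, kecemasan, stress):
--     return {
--         "Depresi": _kategori(depresi, _BOUNDS["Depresi"]),
--         "Kecemasan": _kategori(kecemasan, _BOUNDS["Kecemasan"]),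
--         "Stres": _kategori(stress, _BOUNDS["Stres"]),
--     }
-- ===== Notes on version B (the rewrite author's own statement) =====
-- stated objective: idiomatic
-- what changed: Replaces the three hand-written linear scans over (min,max,label) range triples with a shared label list plus per-dimension cutoff arrays looked up via bisect.bisect_left, with one guard for out-of-range scores.
import Mathlib
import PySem

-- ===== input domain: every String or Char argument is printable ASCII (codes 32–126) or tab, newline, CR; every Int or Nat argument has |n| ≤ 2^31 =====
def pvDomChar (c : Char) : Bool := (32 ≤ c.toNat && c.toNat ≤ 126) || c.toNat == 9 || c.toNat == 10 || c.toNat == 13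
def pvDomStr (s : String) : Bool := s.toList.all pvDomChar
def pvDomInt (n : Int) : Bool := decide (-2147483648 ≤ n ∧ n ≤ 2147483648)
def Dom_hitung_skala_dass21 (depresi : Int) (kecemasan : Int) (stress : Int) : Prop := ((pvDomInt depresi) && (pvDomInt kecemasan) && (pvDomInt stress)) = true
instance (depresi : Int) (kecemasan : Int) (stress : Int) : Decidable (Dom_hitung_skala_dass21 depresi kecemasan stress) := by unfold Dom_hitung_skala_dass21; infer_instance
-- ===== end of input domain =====

-- B classifies each score by binary search over cutoff arrays instead of A's linear range scan; same return value.
-- ===== PORT A =====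
-- the for-loop with break over the range triples: first matching range wins, "" if none matches
def pvScanA (ranges : List (Int × Int × String)) (score : Int) : String :=
  match ranges with
  | [] => ""
  | (mn, mx, kategori) :: rest =>
    if mn ≤ score ∧ score ≤ mx then kategori else pvScanA rest score

def hitung_skala_dass21 (depresi : Int) (kecemasan : Int) (stress : Int) : List (String × String) :=
  let hasil_depresi := pvScanA [(0, 9, "Normal"), (10, 13, "Ringan"), (14, 20, "Sedang"), (21, 27, "Berat"), (28, 100, "Sangat berat")] depresi
  let hasil_kecemasan := pvScanA [(0, 7, "Normal"), (8, 9, "Ringan"), (10, 14, "Sedang"), (15, 19, "Berat"), (20, 100, "Sangat berat")] kecemasan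
  let hasil_stres := pvScanA [(0, 14, "Normal"), (15, 18, "Ringan"), (19, 25, "Sedang"), (26, 33, "Berat"), (34, 100, "Sangat berat")] stress
  [("Depresi", hasil_depresi), ("Kecemasan", hasil_kecemasan), ("Stres", hasil_stres)]

-- ===== PORT B =====
def pvLabelsB : List String := ["Normal", "Ringan", "Sedang", "Berat", "Sangat berat"]

-- bisect.bisect_left on a sorted list = number of elements strictly below score
def pvKategoriB (score : Int) (bounds : List Int) : String :=
  if score < 0 ∨ score > bounds.getLast! then ""
  else pvLabelsB.getD (bounds.countP (fun b => b < score)) ""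

def hitung_skala_dass21_alt (depresi : Int) (kecemasan : Int) (stress : Int) : List (String × String) :=
  [("Depresi", pvKategoriB depresi [9, 13, 20, 27, 100]),
   ("Kecemasan", pvKategoriB kecemasan [7, 9, 14, 19, 100]),
   ("Stres", pvKategoriB stress [14, 18, 25, 33, 100])]

-- ===== PRECONDITION & SPEC =====
def Spec_hitung_skala_dass21 (depresi : Int) (kecemasan : Int) (stress : Int) (out : List (String × String)) : Prop := out = hitung_skala_dass21_alt depresi kecemasan stress
instance (depresi : Int) (kecemasan : Int) (stress : Int) (out : List (String × String)) : Decidable (Spec_hitung_skala_dass21 depresi kecemasan stress out) := by unfold Spec_hitung_skala_dass21; infer_instance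

-- ===== CLAIM (what is proved, stated in full; the proofs are below) =====
def Claim_equal_hitung_skala_dass21 : Prop := ∀ (depresi : Int) (kecemasan : Int) (stress : Int), Dom_hitung_skala_dass21 depresi kecemasan stress → Spec_hitung_skala_dass21 depresi kecemasan stress (hitung_skala_dass21 depresi kecemasan stress)

-- ===== LEMMAS AND PROOFS =====
theorem scan_eq_kategori_dep (v : Int) :
    pvScanA [(0, 9, "Normal"), (10, 13, "Ringan"), (14, 20, "Sedang"), (21, 27, "Berat"), (28, 100, "Sangat berat")] v
      = pvKategoriB v [9, 13, 20, 27, 100] := by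
  simp only [pvScanA, pvKategoriB, pvLabelsB, List.getLast!, List.getLast, List.countP_cons, List.countP_nil,
    decide_eq_true_eq]
  split_ifs <;> first | rfl | omega

theorem scan_eq_kategori_kec (v : Int) :
    pvScanA [(0, 7, "Normal"), (8, 9, "Ringan"), (10, 14, "Sedang"), (15, 19, "Berat"), (20, 100, "Sangat berat")] v
      = pvKategoriB v [7, 9, 14, 19, 100] := by
  simp only [pvScanA, pvKategoriB, pvLabelsB, List.getLast!, List.getLast, List.countP_cons, List.countP_nil,
    decide_eq_true_eq]
  split_ifs <;> first | rfl | omega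

theorem scan_eq_kategori_str (v : Int) :
    pvScanA [(0, 14, "Normal"), (15, 18, "Ringan"), (19, 25, "Sedang"), (26, 33, "Berat"), (34, 100, "Sangat berat")] v
      = pvKategoriB v [14, 18, 25, 33, 100] := by
  simp only [pvScanA, pvKategoriB, pvLabelsB, List.getLast!, List.getLast, List.countP_cons, List.countP_nil,
    decide_eq_true_eq]
  split_ifs <;> first | rfl | omega

-- ===== VERDICT (by name: the statement is the Claim_ definition above) =====
theorem hitung_skala_dass21_spec : Claim_equal_hitung_skala_dass21 := by
  intro d k s _
  show _ = _
  simp only [hitung_skala_dass21, hitung_skala_dass21_alt,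
    scan_eq_kategori_dep, scan_eq_kategori_kec, scan_eq_kategori_str]
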